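-- pv_equiv track=rewrite | github.com/effoT/codingbat-py | Array-3.py | squareUp
-- ===== SOURCE A (Python) =====
-- def squareUp(num):
--     if not num or num == 0:
--         return []
--
--     # array collection
--     arrayCol = []
--
--     # run from 1 to the required amount and fix the indexing when writing
--     for o in range(1, num +1):
--
--         # prep a temp array filled with the necessary amount of 0
--         array = []
--         for temp in range(num):
--             array.append(0)
--
--         for i in range(1, num +1): # set up the array with the current max number for the section
--             if i <= o: # if the running value is in range with the "section" set the value otherwise leave it with it's prepped 0
--                 array[(i - 1)] = i
--         arrayCol += array[::-1] # merge the array in reverse to the collection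
--     return arrayCol
-- ===== SOURCE B (Python) =====
-- def squareUp(num):
--     if not num or num <= 0:
--         return []
--     # single flat pass: element at index k is v = num - k % num if it has
--     # already "ramped in" for section k // num, else 0 -- no row building.
--     return [num - k % num if num - k % num <= k // num + 1 else 0
--             for k in range(num * num)]
-- ===== Notes on version B (the rewrite author's own statement) =====
-- stated objective: alternative
-- what changed: Replaces the row-by-row build (zero prefill, conditional index assignment, reverse, concatenate) with a single flat pass over range(num*num) computing each element by a closed-form arithmetic rule from its index (v = num - k%num, emitted iff v <= k//num + 1).
import Mathlib
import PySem

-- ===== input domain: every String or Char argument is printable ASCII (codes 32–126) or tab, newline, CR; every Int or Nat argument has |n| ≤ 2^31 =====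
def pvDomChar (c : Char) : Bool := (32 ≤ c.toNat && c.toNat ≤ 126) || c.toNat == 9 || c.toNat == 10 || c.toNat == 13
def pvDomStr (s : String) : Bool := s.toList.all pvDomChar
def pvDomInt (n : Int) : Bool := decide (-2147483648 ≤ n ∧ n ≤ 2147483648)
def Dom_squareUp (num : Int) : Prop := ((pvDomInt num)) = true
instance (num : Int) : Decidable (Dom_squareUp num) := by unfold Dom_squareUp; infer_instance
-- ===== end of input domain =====

-- B computes every element of the flat result in one pass over range(num*num) by a
-- closed-form arithmetic rule on the index, instead of A's row-by-row build
-- (zero prefill, conditional index assignment, reverse, concatenate); objective: alternative.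

-- ===== PORT A =====
-- array[(i-1)] = i : index i-1 is always in range (1 ≤ i ≤ num = array length), so List.set
-- with (i-1).toNat is exact here; array[::-1] is slice? with step -1, always `some`.
def squareUp (num : Int) : List Int :=
  if num = 0 then []        -- `not num or num == 0` on an int is just num == 0
  else
    (PySem.List.pyRange 1 (num + 1) 1).foldl (fun arrayCol o =>
      let array : List Int :=
        (PySem.List.pyRange 0 num 1).foldl (fun array _ => array ++ [(0 : Int)]) []
      let array :=
        (PySem.List.pyRange 1 (num + 1) 1).foldl (fun array i =>
          if i ≤ o then array.set (i - 1).toNat i else array) array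
      arrayCol ++ (PySem.List.slice? array none none (-1)).getD []) []

-- ===== PORT B =====
def squareUp_alt (num : Int) : List Int :=
  if num ≤ 0 then []
  else
    (PySem.List.pyRange 0 (num * num) 1).map (fun k =>
      if num - PySem.Int.mod k num ≤ PySem.Int.floordiv k num + 1
      then num - PySem.Int.mod k num else 0)

-- ===== PRECONDITION & SPEC =====
def Spec_squareUp (num : Int) (out : List Int) : Prop := out = squareUp_alt num
instance (num : Int) (out : List Int) : Decidable (Spec_squareUp num out) := by unfold Spec_squareUp; infer_instance

-- ===== CLAIM (what is proved, stated in full; the proofs are below) =====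
def Claim_equal_squareUp : Prop := ∀ (num : Int), Dom_squareUp num → Spec_squareUp num (squareUp num)

-- ===== LEMMAS AND PROOFS =====

-- the canonical value both programs compute: section o contributes (n-o) zeros then o..1
def pvCanon (num : Int) : List Int :=
  (PySem.List.pyRange 1 (num + 1) 1).flatMap
    (fun o => List.replicate (num - o).toNat (0 : Int) ++ PySem.List.pyRange o 0 (-1))

-- the zero-prefill loop (as a flatMap of singletons) builds a replicate
theorem pv_zeros (l : List Int) :
    List.flatMap (fun _ => [(0 : Int)]) l = List.replicate l.length (0 : Int) := by
  induction l with
  | nil => simp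
  | cons x xs ih => simp [ih, List.replicate_succ]

-- setting at the boundary index appends-in-place
theorem pv_set_at_length (l r : List Int) (v w : Int) :
    (l ++ w :: r).set l.length v = l ++ v :: r := by simp

-- the index-assignment loop over 0..k-1 writes the prefix 1..k
theorem pv_setloop (k : Nat) (arr : List Int) (hk : k ≤ arr.length) :
    (List.range k).foldl (fun a j => a.set j ((j : Int) + 1)) arr
      = (List.range k).map (fun j : Nat => ((j : Int) + 1)) ++ arr.drop k := by
  induction k with
  | zero => simp
  | succ k ih =>
    have hk' : k ≤ arr.length := Nat.le_of_succ_le hk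
    have hlt : k < arr.length := hk
    rw [List.range_succ, List.foldl_append, ih hk', List.foldl_cons, List.foldl_nil,
        List.drop_eq_getElem_cons hlt]
    have hset := pv_set_at_length ((List.range k).map (fun j : Nat => ((j : Int) + 1)))
        (arr.drop (k + 1)) ((k : Int) + 1) (arr[k])
    simp only [List.length_map, List.length_range] at hset
    rw [hset]
    simp

-- A computes the canonical value (for positive num)
theorem pv_A_canon (num : Int) (hpos : 0 < num) : squareUp num = pvCanon num := by
  unfold squareUp pvCanon
  rw [if_neg (by omega)]
  rw [PySem.List.foldl_append_eq_flatMap, PySem.List.foldl_append_eq_flatMap]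
  simp only [List.nil_append]
  apply List.flatMap_congr
  intro o ho
  have hmem := (PySem.List.mem_pyRange_one).mp ho
  have h1o : 1 ≤ o := hmem.1
  have hon : o ≤ num := by omega
  rw [pv_zeros, PySem.List.length_pyRange_one]
  rw [PySem.List.pyRange_one_append 1 (o + 1) (num + 1) (by omega) (by omega),
      List.foldl_append]
  have hid : (PySem.List.pyRange (o + 1) (num + 1) 1).foldl
      (fun (array : List Int) i => if i ≤ o then array.set (i - 1).toNat i else array)
      ((PySem.List.pyRange 1 (o + 1) 1).foldl
        (fun array i => if i ≤ o then array.set (i - 1).toNat i else array)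
        (List.replicate (num - 0).toNat (0 : Int)))
      = (PySem.List.pyRange 1 (o + 1) 1).foldl
        (fun array i => if i ≤ o then array.set (i - 1).toNat i else array)
        (List.replicate (num - 0).toNat (0 : Int)) := by
    rw [PySem.List.foldl_congr_mem (g := fun a _ => a)]
    · exact List.foldl_fixed _
    · intro acc x hx
      have := (PySem.List.mem_pyRange_one).mp hx
      rw [if_neg (by omega)]
  rw [hid]
  have hfire : (PySem.List.pyRange 1 (o + 1) 1).foldl
      (fun (array : List Int) i => if i ≤ o then array.set (i - 1).toNat i else array)
      (List.replicate (num - 0).toNat (0 : Int))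
    = (PySem.List.pyRange 1 (o + 1) 1).foldl
      (fun (array : List Int) i => array.set (i - 1).toNat i)
      (List.replicate (num - 0).toNat (0 : Int)) := by
    apply PySem.List.foldl_congr_mem
    intro acc x hx
    have := (PySem.List.mem_pyRange_one).mp hx
    rw [if_pos (by omega)]
  rw [hfire]
  rw [PySem.List.pyRange_one, List.foldl_map]
  have hoeq : (o + 1 - 1).toNat = o.toNat := by omega
  rw [hoeq]
  have hfold :
      (List.range o.toNat).foldl
          (fun (a : List Int) (k : Nat) => a.set (1 + (k : Int) - 1).toNat (1 + (k : Int)))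
          (List.replicate (num - 0).toNat (0 : Int))
        = (List.range o.toNat).foldl
          (fun (a : List Int) (j : Nat) => a.set j ((j : Int) + 1))
          (List.replicate (num - 0).toNat (0 : Int)) := by
    apply PySem.List.foldl_congr_mem
    intro acc k _
    have h1 : (1 + (k : Int) - 1).toNat = k := by omega
    rw [h1]; ring_nf
  rw [hfold, pv_setloop o.toNat _ (by simp; omega)]
  rw [PySem.List.slice?_none_none_neg_one, Option.getD_some]
  rw [List.reverse_append, List.drop_replicate, List.reverse_replicate]
  have hz : ((num - 0).toNat - o.toNat) = (num - o).toNat := by omega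
  rw [hz]
  congr 1
  rw [PySem.List.pyRange_neg_one_eq_reverse]
  congr 1
  rw [PySem.List.pyRange_one]
  simp
  intro k _
  omega

-- a map over range (c*n) splits into c blocks of n (row-major)
theorem pv_map_range_mul {α : Type} (f : Nat → α) (c n : Nat) :
    (List.range (c * n)).map f
      = (List.range c).flatMap (fun o => (List.range n).map (fun j => f (o * n + j))) := by
  induction c with
  | zero => simp
  | succ c ih =>
    rw [Nat.succ_mul, List.range_add, List.map_append, ih, List.range_succ,
        List.flatMap_append]
    simp [List.map_map, Function.comp_def]

-- B computes the canonical value (for positive num)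
theorem pv_B_canon (num : Int) (hpos : 0 < num) : squareUp_alt num = pvCanon num := by
  unfold squareUp_alt pvCanon
  rw [if_neg (by omega)]
  obtain ⟨n, rfl⟩ : ∃ n : Nat, num = (n : Int) := ⟨num.toNat, by omega⟩
  have hn : 0 < n := by exact_mod_cast hpos
  have hmul : ((n : Int) * n) = ((n * n : Nat) : Int) := by push_cast; ring
  rw [hmul, PySem.List.pyRange_one, List.map_map]
  have hNN : (((n * n : Nat) : Int) - 0).toNat = n * n := by omega
  rw [hNN, pv_map_range_mul]
  rw [PySem.List.pyRange_one]
  have hN : (((n : Int) + 1) - 1).toNat = n := by omega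
  rw [hN, List.flatMap_map]
  apply List.flatMap_congr
  intro o ho
  have holt : o < n := List.mem_range.mp ho
  -- evaluate mod / floordiv at index o*n+j by Nat arithmetic
  have hrow : ∀ j ∈ List.range n,
      ((fun k => if (n : Int) - PySem.Int.mod k n ≤ PySem.Int.floordiv k n + 1
          then (n : Int) - PySem.Int.mod k n else 0) ∘ fun k : Nat => (0 : Int) + (k : Int))
        (o * n + j)
      = (if (n : Int) - j ≤ (o : Int) + 1 then (n : Int) - j else 0) := by
    intro j hj
    have hjlt : j < n := List.mem_range.mp hj
    have hmod : (o * n + j) % n = j := by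
      rw [Nat.add_comm, Nat.add_mul_mod_self_right, Nat.mod_eq_of_lt hjlt]
    have hdiv : (o * n + j) / n = o := by
      rw [Nat.add_comm, Nat.add_mul_div_right _ _ hn, Nat.div_eq_of_lt hjlt]
      omega
    simp only [Function.comp_apply, zero_add]
    rw [PySem.Int.mod_natCast, PySem.Int.floordiv_natCast, hmod, hdiv]
  rw [List.map_congr_left hrow]
  -- split the row: (n-(o+1)) leading zeros, then the descending ramp o+1 .. 1
  have hsplit : n = (n - (o + 1)) + (o + 1) := by omega
  rw [hsplit, List.range_add, List.map_append]
  congr 1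
  · -- zeros part
    rw [show (((n - (o+1)) + (o+1) : Nat) : Int) - (1 + (o : Int)) = ((n - (o+1) : Nat) : Int) by push_cast; omega]
    have : ∀ j ∈ List.range (n - (o + 1)),
        (if (((n - (o+1)) + (o+1) : Nat) : Int) - j ≤ (o : Int) + 1
         then (((n - (o+1)) + (o+1) : Nat) : Int) - j else 0) = (0 : Int) := by
      intro j hj
      have := List.mem_range.mp hj
      rw [if_neg (by push_cast; omega)]
    rw [List.map_congr_left this, List.map_const']
    simp
  · -- ramp part
    rw [PySem.List.pyRange_neg_one]
    have h1 : ((1 + (o : Int)) - 0).toNat = o + 1 := by omega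
    rw [h1, List.map_map]
    apply List.map_congr_left
    intro i hi
    have hilt : i < o + 1 := List.mem_range.mp hi
    simp only [Function.comp_apply]
    rw [if_pos (by push_cast; omega)]
    push_cast
    omega

theorem pv_main (num : Int) : squareUp num = squareUp_alt num := by
  by_cases hpos : 0 < num
  · rw [pv_A_canon num hpos, pv_B_canon num hpos]
  · unfold squareUp squareUp_alt
    have hle : num ≤ 0 := by omega
    rw [if_pos hle]
    by_cases h0 : num = 0
    · rw [if_pos h0]
    · rw [if_neg h0, PySem.List.pyRange_one_eq_nil (a := 1) (b := num + 1) (by omega)]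
      simp

-- ===== VERDICT (by name: the statement is the Claim_ definition above) =====
theorem squareUp_spec : Claim_equal_squareUp := by
  intro num _
  exact pv_main num
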